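-- pv_equiv track=rewrite | github.com/xiongxxl/SPABA | project/paba/remove_letter_number.py | find_and_remove_non_letters
-- ===== SOURCE A (Python) =====
-- def find_and_remove_non_letters(input_string):
--     non_letter_positions = []
--     clean_string = ""
--
--     for i, char in enumerate(input_string):
--         if not char.isalpha():
--             non_letter_positions.append(i)
--         else:
--             clean_string += char
--
--     return non_letter_positions, clean_string
-- ===== SOURCE B (Python) =====
-- def find_and_remove_non_letters(input_string):
--     n = len(input_string)
--     positions = []
--     chunks = []
--     i = 0
--     while i < n:
--         if input_string[i].isalpha():
--             j = i + 1
--             while j < n and input_string[j].isalpha():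
--                 j += 1
--             chunks.append(input_string[i:j])
--             i = j
--         else:
--             positions.append(i)
--             i += 1
--     return positions, "".join(chunks)
-- ===== Notes on version B (the rewrite author's own statement) =====
-- stated objective: alternative
-- what changed: Replaces the per-character fused classification loop by a two-pointer run scanner: an inner loop finds each maximal alphabetic run, which is appended as one slice and joined at the end, while single non-letter positions are recorded between runs.
import Mathlib
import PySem

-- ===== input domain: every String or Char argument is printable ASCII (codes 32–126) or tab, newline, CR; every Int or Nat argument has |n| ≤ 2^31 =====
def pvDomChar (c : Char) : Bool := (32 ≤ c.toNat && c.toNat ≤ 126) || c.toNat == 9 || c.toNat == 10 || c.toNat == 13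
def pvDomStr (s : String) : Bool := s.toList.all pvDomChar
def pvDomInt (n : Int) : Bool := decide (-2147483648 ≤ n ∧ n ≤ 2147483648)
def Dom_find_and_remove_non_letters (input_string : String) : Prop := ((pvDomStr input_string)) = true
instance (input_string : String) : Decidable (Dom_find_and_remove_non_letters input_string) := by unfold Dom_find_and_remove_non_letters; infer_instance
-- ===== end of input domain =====

-- B replaces A's per-character fused classification loop by a two-pointer run scanner
-- (inner loop finds each maximal alphabetic run, appended as one slice and joined at the end);
-- an alternative decomposition with the same outputs.

-- ===== PORT A =====
-- loop body of A: append position if non-letter, else append the char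
def pvStepA (acc : List Int × List Char) (ic : Int × Char) : List Int × List Char :=
  if !(PySem.Chars.isalpha ic.2) then (acc.1 ++ [ic.1], acc.2) else (acc.1, acc.2 ++ [ic.2])

-- one fused loop over enumerate, threading both accumulators
def find_and_remove_non_letters (input_string : String) : List Int × String :=
  let st := (PySem.List.enumerate input_string.toList).foldl pvStepA
    (([] : List Int), ([] : List Char))
  (st.1, String.ofList st.2)

-- ===== PORT B =====
-- inner while loop of B: advance j while j < n and input_string[j].isalpha()
def pvRun (l : List Char) (j : Nat) : Nat :=
  if h : j < l.length then
    if PySem.Chars.isalpha l[j] then pvRun l (j + 1) else j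
  else j
termination_by l.length - j

-- pvGo's termination needs this fact about the inner loop
theorem pvRun_ge (l : List Char) (j : Nat) : j ≤ pvRun l j := by
  rw [pvRun]
  split_ifs with hk ha
  · exact Nat.le_trans (Nat.le_succ j) (pvRun_ge l (j + 1))
  · exact Nat.le_refl j
  · exact Nat.le_refl j
termination_by l.length - j

-- outer while loop of B: two-pointer run scan, collecting positions and run slices
def pvGo (l : List Char) (i : Nat) (positions : List Int) (chunks : List (List Char)) :
    List Int × List (List Char) :=
  if h : i < l.length then
    if PySem.Chars.isalpha l[i] then
      let j := pvRun l (i + 1)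
      pvGo l j positions (chunks ++ [PySem.List.slice l (some (i : Int)) (some (j : Int))])
    else
      pvGo l (i + 1) (positions ++ [(i : Int)]) chunks
  else (positions, chunks)
termination_by l.length - i
decreasing_by
  · have := pvRun_ge l (i + 1); omega
  · omega

def find_and_remove_non_letters_alt (input_string : String) : List Int × String :=
  let st := pvGo input_string.toList 0 [] []
  (st.1, String.ofList st.2.flatten)   -- "".join(chunks)

-- ===== PRECONDITION & SPEC =====
def Spec_find_and_remove_non_letters (input_string : String) (out : List Int × String) : Prop := out = find_and_remove_non_letters_alt input_string
instance (input_string : String) (out : List Int × String) : Decidable (Spec_find_and_remove_non_letters input_string out) := by unfold Spec_find_and_remove_non_letters; infer_instance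

-- ===== CLAIM (what is proved, stated in full; the proofs are below) =====
def Claim_equal_find_and_remove_non_letters : Prop := ∀ (input_string : String), Dom_find_and_remove_non_letters input_string → Spec_find_and_remove_non_letters input_string (find_and_remove_non_letters input_string)

-- ===== LEMMAS AND PROOFS =====

-- A's fold computes the non-letter positions and the letters of the suffix
theorem pv_fold_eq (l : List Char) : ∀ (s : Int) (acc1 : List Int) (acc2 : List Char),
    (PySem.List.enumerate l s).foldl pvStepA (acc1, acc2)
    = (acc1 ++ ((PySem.List.enumerate l s).filter (fun ic => !(PySem.Chars.isalpha ic.2))).map (·.1),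
       acc2 ++ l.filter (fun c => PySem.Chars.isalpha c)) := by
  induction l with
  | nil => intro s acc1 acc2; simp [PySem.List.enumerate_nil]
  | cons c t ih =>
    intro s acc1 acc2
    rw [PySem.List.enumerate_cons, List.foldl_cons, List.filter_cons]
    by_cases h : PySem.Chars.isalpha c
    · have hs : pvStepA (acc1, acc2) (s, c) = (acc1, acc2 ++ [c]) := by simp [pvStepA, h]
      rw [hs, ih]; simp [h]
    · have hs : pvStepA (acc1, acc2) (s, c) = (acc1 ++ [s], acc2) := by simp [pvStepA, h]
      rw [hs, ih]; simp [h]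

-- pvRun k skips a block of letters: positions are unaffected, and the letters of the
-- suffix at k are the skipped block followed by the letters of the suffix at pvRun l k
theorem pvRun_spec (l : List Char) (k : Nat) :
    (((PySem.List.enumerate (l.drop k) (k : Int)).filter (fun ic => !(PySem.Chars.isalpha ic.2))).map (·.1)
      = ((PySem.List.enumerate (l.drop (pvRun l k)) ((pvRun l k : Nat) : Int)).filter (fun ic => !(PySem.Chars.isalpha ic.2))).map (·.1))
  ∧ ((l.drop k).filter (fun c => PySem.Chars.isalpha c)
      = (l.drop k).take (pvRun l k - k) ++ (l.drop (pvRun l k)).filter (fun c => PySem.Chars.isalpha c)) := by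
  rw [pvRun]
  split_ifs with hk ha
  · have ih := pvRun_spec l (k + 1)
    have hge : k + 1 ≤ pvRun l (k + 1) := pvRun_ge l (k + 1)
    have hdrop : l.drop k = l[k] :: l.drop (k + 1) := List.drop_eq_getElem_cons hk
    have hcast : ((k : Int) + 1) = ((k + 1 : Nat) : Int) := by push_cast; ring
    constructor
    · rw [hdrop, PySem.List.enumerate_cons, List.filter_cons, hcast]
      simp only [ha, Bool.not_true, Bool.false_eq_true, if_false]
      exact ih.1
    · have htake : (l[k] :: l.drop (k + 1)).take (pvRun l (k + 1) - k)
          = l[k] :: (l.drop (k + 1)).take (pvRun l (k + 1) - (k + 1)) := by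
        have hsub : pvRun l (k + 1) - k = (pvRun l (k + 1) - (k + 1)) + 1 := by omega
        rw [hsub, List.take_succ_cons]
      rw [hdrop, List.filter_cons, htake]
      simp only [ha, if_true]
      rw [ih.2, List.cons_append]
  · constructor
    · rfl
    · simp
  · constructor
    · rfl
    · simp
termination_by l.length - k

-- the outer loop appends the remaining non-letter positions and (after flattening)
-- the remaining letters to the accumulators
theorem pvGo_spec (l : List Char) (i : Nat) (P : List Int) (C : List (List Char)) :
    ((pvGo l i P C).1 = P ++ ((PySem.List.enumerate (l.drop i) (i : Int)).filter (fun ic => !(PySem.Chars.isalpha ic.2))).map (·.1))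
  ∧ ((pvGo l i P C).2.flatten = C.flatten ++ (l.drop i).filter (fun c => PySem.Chars.isalpha c)) := by
  rw [pvGo]
  split_ifs with h ha
  · -- letter: one run is consumed
    have hge : i + 1 ≤ pvRun l (i + 1) := pvRun_ge l (i + 1)
    have ih := pvGo_spec l (pvRun l (i + 1)) P
      (C ++ [PySem.List.slice l (some (i : Int)) (some ((pvRun l (i + 1) : Nat) : Int))])
    have hrs := pvRun_spec l (i + 1)
    have hdrop : l.drop i = l[i] :: l.drop (i + 1) := List.drop_eq_getElem_cons h
    have hcast : ((i : Int) + 1) = ((i + 1 : Nat) : Int) := by push_cast; ring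
    constructor
    · rw [ih.1, hdrop, PySem.List.enumerate_cons, List.filter_cons, hcast]
      simp only [ha, Bool.not_true, Bool.false_eq_true, if_false]
      rw [hrs.1]
    · rw [ih.2, List.flatten_append]
      have hslice : PySem.List.slice l (some (i : Int)) (some ((pvRun l (i + 1) : Nat) : Int))
          = (l.drop i).take (pvRun l (i + 1) - i) := PySem.List.slice_natCast l i (pvRun l (i + 1))
      have htake : (l.drop i).take (pvRun l (i + 1) - i)
          = l[i] :: (l.drop (i + 1)).take (pvRun l (i + 1) - (i + 1)) := by
        rw [hdrop]
        have hsub : pvRun l (i + 1) - i = (pvRun l (i + 1) - (i + 1)) + 1 := by omega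
        rw [hsub, List.take_succ_cons]
      conv_lhs => rw [hslice, htake]
      conv_rhs => rw [hdrop, List.filter_cons]
      simp only [ha, if_true]
      rw [hrs.2]
      simp
  · -- non-letter: record the position
    have ih := pvGo_spec l (i + 1) (P ++ [(i : Int)]) C
    have hdrop : l.drop i = l[i] :: l.drop (i + 1) := List.drop_eq_getElem_cons h
    have hcast : ((i : Int) + 1) = ((i + 1 : Nat) : Int) := by push_cast; ring
    constructor
    · rw [ih.1, hdrop, PySem.List.enumerate_cons, List.filter_cons, hcast]
      simp [ha]
    · rw [ih.2, hdrop, List.filter_cons]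
      simp [ha]
  · have hdrop : l.drop i = [] := List.drop_eq_nil_of_le (by omega)
    rw [hdrop]
    constructor
    · simp [PySem.List.enumerate_nil]
    · simp
termination_by l.length - i
decreasing_by
  · have := pvRun_ge l (i + 1); omega
  · omega

-- ===== VERDICT (by name: the statement is the Claim_ definition above) =====
theorem find_and_remove_non_letters_spec : Claim_equal_find_and_remove_non_letters := by
  intro s _
  show _ = _
  have hA := pv_fold_eq s.toList 0 [] []
  have hB := pvGo_spec s.toList 0 [] []
  simp only [find_and_remove_non_letters, find_and_remove_non_letters_alt, hA]
  simp only [List.drop_zero, List.nil_append, List.flatten_nil] at hB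
  rw [Prod.ext_iff]
  refine ⟨hB.1.symm, ?_⟩
  simp only [List.nil_append]
  rw [hB.2]
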